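-- pv_equiv track=rewrite | github.com/PARKJUHONG123/coding-test | P84021.py | solution
-- ===== SOURCE A (Python) =====
-- import collections
--
-- def cover(route):
--     min_x = min(route, key = lambda x : x[0])[0]
--     min_y = min(route, key = lambda x : x[1])[1]
--     max_x = max(route, key = lambda x : x[0])[0]
--     max_y = max(route, key = lambda x : x[1])[1]
--
--     ret = [[0 for _ in range(max_y - min_y + 1)] for _ in range(max_x - min_x + 1)]
--
--     for element in route:
--         ret[element[0] - min_x][element[1] - min_y] = 1
--
--     return ret
--
-- def get_rotates(blocks):
--     targets = cover(blocks[:])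
--     rotate_list = list()
--     rotate_list.append(targets)
--
--     for _ in range(3):
--         height, width = len(targets), len(targets[0])
--         temp = [[0 for _ in range(height)] for _ in range(width)]
--         for i in range(height):
--             for j in range(width):
--                 temp[j][height - i - 1] = targets[i][j]
--         rotate_list.append(temp)
--         targets = temp[:]
--
--     return rotate_list
--
-- def solution(game_board, table):
--     answer = 0
--     length = len(game_board)
--     direction = [[-1, 0], [1, 0], [0, -1], [0, 1]]
--
--     queue_empty = collections.deque()
--     queue_block = collections.deque()
--
--     empty_list = list()
--     block_list = list()
--
--     for i in range(length):
--         for j in range(length):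
--
--             if game_board[i][j] == 0:
--                 game_board[i][j] = 2
--                 queue_empty.append([i, j])
--                 empty = [[i, j]]
--
--                 while queue_empty:
--                     qi, qj = queue_empty.popleft()
--
--                     for di, dj in direction:
--                         ni, nj = qi + di, qj + dj
--
--                         if 0 <= ni < length and 0 <= nj < length:
--                             if game_board[ni][nj] == 0:
--                                 game_board[ni][nj] = 2
--                                 queue_empty.append([ni, nj])
--                                 empty.append([ni, nj])
--                 empty_list.append(empty)
--
--             if table[i][j] == 1:
--                 table[i][j] = 2
--                 queue_block.append([i, j])
--                 block = [[i, j]]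
--
--                 while queue_block:
--                     qi, qj = queue_block.popleft()
--
--                     for di, dj in direction:
--                         ni, nj = qi + di, qj + dj
--
--                         if 0 <= ni < length and 0 <= nj < length:
--                             if table[ni][nj] == 1:
--                                 table[ni][nj] = 2
--                                 queue_block.append([ni, nj])
--                                 block.append([ni, nj])
--                 block_list.append(block)
--
--
--
--     used_list = [False for _ in range(len(block_list))]
--     full_list = [False for _ in range(len(empty_list))]
--
--
--     for empty_index, emptys in enumerate(empty_list):
--         for block_index, blocks in enumerate(block_list):
--             if len(emptys) == len(blocks) and not used_list[block_index] and not full_list[empty_index]: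
--
--                 target_empty = cover(emptys)
--                 rotated = get_rotates(blocks)
--                 for rotate in rotated:
--                     if target_empty == rotate:
--                         used_list[block_index] = True
--                         full_list[empty_index] = True
--                         answer += len(emptys)
--                         break
--     return answer
-- ===== SOURCE B (Python) =====
-- import collections
--
-- def _flood(grid, n, val, si, sj):
--     # BFS collecting one region; marks visited cells with 2 (on a private copy of the grid)
--     grid[si][sj] = 2
--     q = collections.deque()
--     q.append((si, sj))
--     cells = [(si, sj)]
--     while q:
--         ci, cj = q.popleft()
--         for di, dj in ((-1, 0), (1, 0), (0, -1), (0, 1)):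
--             ni, nj = ci + di, cj + dj
--             if 0 <= ni < n and 0 <= nj < n and grid[ni][nj] == val:
--                 grid[ni][nj] = 2
--                 q.append((ni, nj))
--                 cells.append((ni, nj))
--     return cells
--
-- def _regions(grid, n, val):
--     g = [row[:] for row in grid]
--     regs = []
--     for i in range(n):
--         for j in range(n):
--             if g[i][j] == val:
--                 regs.append(_flood(g, n, val, i, j))
--     return regs
--
-- def _shape(cells):
--     min_i = min(c[0] for c in cells)
--     min_j = min(c[1] for c in cells)
--     max_i = max(c[0] for c in cells)
--     max_j = max(c[1] for c in cells)
--     s = set(cells)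
--     return tuple(tuple(1 if (i, j) in s else 0 for j in range(min_j, max_j + 1))
--                  for i in range(min_i, max_i + 1))
--
-- def _rot(m):
--     h, w = len(m), len(m[0])
--     return tuple(tuple(m[h - 1 - k][j] for k in range(h)) for j in range(w))
--
-- def _canon(cells):
--     m = _shape(cells)
--     best = m
--     for _ in range(3):
--         m = _rot(m)
--         if m < best:
--             best = m
--     return best
--
-- def solution(game_board, table):
--     n = len(game_board)
--     empties = _regions(game_board, n, 0)
--     blocks = _regions(table, n, 1)
--     bucket = {}
--     for b in blocks:
--         k = (len(b), _canon(b))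
--         bucket[k] = bucket.get(k, 0) + 1
--     answer = 0
--     for e in empties:
--         k = (len(e), _canon(e))
--         if bucket.get(k, 0) > 0:
--             bucket[k] = bucket.get(k, 0) - 1
--             answer += len(e)
--     return answer
-- ===== Notes on version B (the rewrite author's own statement) =====
-- stated objective: alternative
-- what changed: A matches every empty region against every block in a greedy double loop with used/full flag lists, comparing the empty region's cover against all four rotations of each candidate block; B canonicalizes each region's shape once to its lexicographically minimal rotation, counts blocks in a dict keyed by (size, canonical shape), and matches each empty region by a single dict lookup.
import Mathlib
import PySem

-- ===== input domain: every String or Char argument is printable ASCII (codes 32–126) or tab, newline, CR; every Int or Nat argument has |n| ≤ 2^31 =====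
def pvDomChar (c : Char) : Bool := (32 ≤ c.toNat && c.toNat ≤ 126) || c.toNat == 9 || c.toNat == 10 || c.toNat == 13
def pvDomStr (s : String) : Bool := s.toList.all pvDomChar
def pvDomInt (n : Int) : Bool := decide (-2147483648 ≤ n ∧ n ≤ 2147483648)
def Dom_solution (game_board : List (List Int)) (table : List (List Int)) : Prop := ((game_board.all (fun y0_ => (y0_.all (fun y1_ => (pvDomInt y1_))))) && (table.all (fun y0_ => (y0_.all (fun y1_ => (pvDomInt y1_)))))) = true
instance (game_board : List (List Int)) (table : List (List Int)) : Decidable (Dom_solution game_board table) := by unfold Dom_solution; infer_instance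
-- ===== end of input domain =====

-- B replaces A's greedy pairwise rotation matching (used/full flag lists, four rotation
-- comparisons per candidate pair) by canonical minimal-rotation shape keys counted in a dict and
-- matched in one pass per region.  Equivalence is about the RETURN value only: Python A mutates
-- game_board and table in place (marks visited cells with 2); Python B copies and leaves its
-- arguments unchanged.

-- ===== PORT A =====
-- shared grid primitives (the BFS flood fill is textually identical in Source A and Source B, so both
-- ports use these same helpers; everything after region extraction is separate)
abbrev pvMat : Type := List (List Int)
abbrev pvCell : Type := Nat × Nat
abbrev pvReg : Type := List pvCell

def pvDirs : List (Int × Int) := [(-1, 0), (1, 0), (0, -1), (0, 1)]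

-- grid[i][j]; the default 2 is never consulted under Pre_ (all accesses are in range there)
def pvGetI (g : pvMat) (i j : Nat) : Int := (g.getD i []).getD j 2

-- grid[i][j] = 2  (the visited mark)
def pvMark (g : pvMat) (i j : Nat) : pvMat := g.set i ((g.getD i []).set j 2)

-- one dequeued cell: try the four neighbours, marking/enqueuing/collecting the unvisited ones
def pvBfsStep (n : Nat) (val : Int) (c : pvCell)
    (st : pvMat × List pvCell × List pvCell) : pvMat × List pvCell × List pvCell :=
  pvDirs.foldl (fun s d =>
    let ni : Int := (c.1 : Int) + d.1
    let nj : Int := (c.2 : Int) + d.2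
    if 0 ≤ ni ∧ ni < (n : Int) ∧ 0 ≤ nj ∧ nj < (n : Int) ∧ pvGetI s.1 ni.toNat nj.toNat = val then
      (pvMark s.1 ni.toNat nj.toNat, s.2.1 ++ [(ni.toNat, nj.toNat)], s.2.2 ++ [(ni.toNat, nj.toNat)])
    else s) st

-- `while queue:` — fuel n*n+1 covers every iteration (each enqueue marks a fresh cell)
def pvBfs (n : Nat) (val : Int) : Nat → pvMat → List pvCell → List pvCell → pvMat × List pvCell
  | 0, g, _, cells => (g, cells)
  | _ + 1, g, [], cells => (g, cells)
  | fuel + 1, g, c :: rest, cells =>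
    let s := pvBfsStep n val c (g, rest, cells)
    pvBfs n val fuel s.1 s.2.1 s.2.2

def pvFlood (n : Nat) (val : Int) (g : pvMat) (i j : Nat) : pvMat × pvReg :=
  pvBfs n val (n * n + 1) (pvMark g i j) [(i, j)] [(i, j)]

def pvScanStep (n : Nat) (val : Int) (st : pvMat × List pvReg) (ij : pvCell) : pvMat × List pvReg :=
  if pvGetI st.1 ij.1 ij.2 = val then
    let r := pvFlood n val st.1 ij.1 ij.2
    (r.1, st.2 ++ [r.2])
  else st

-- the row-major scan order `for i in range(n): for j in range(n):`
def pvIdx (n : Nat) : List pvCell :=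
  (List.range n).flatMap (fun i => (List.range n).map (fun j => (i, j)))

-- A's cover(): bounding-box min/max via Python's min/max with key (first extremal element),
-- then a zero matrix with 1 written at each cell
def pvCover (route : pvReg) : pvMat :=
  match route with
  | [] => []
  | r0 :: rs =>
    let minx := (rs.foldl (fun b c => if c.1 < b.1 then c else b) r0).1
    let miny := (rs.foldl (fun b c => if c.2 < b.2 then c else b) r0).2
    let maxx := (rs.foldl (fun b c => if b.1 < c.1 then c else b) r0).1
    let maxy := (rs.foldl (fun b c => if b.2 < c.2 then c else b) r0).2
    let ret := List.replicate (maxx - minx + 1) (List.replicate (maxy - miny + 1) (0 : Int))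
    route.foldl (fun m c => m.set (c.1 - minx) ((m.getD (c.1 - minx) []).set (c.2 - miny) 1)) ret

-- one 90° rotation, A-style: fill a zero w×h matrix cell by cell (temp[j][h-1-i] = t[i][j])
def pvRotA (t : pvMat) : pvMat :=
  let h := t.length
  let w := (t.getD 0 []).length
  let temp := List.replicate w (List.replicate h (0 : Int))
  (List.range h).foldl (fun tmp i =>
    (List.range w).foldl (fun tmp j =>
      tmp.set j ((tmp.getD j []).set (h - 1 - i) ((t.getD i []).getD j 0))) tmp) temp

-- A's get_rotates on an already-covered matrix
def pvRotates (t : pvMat) : List pvMat :=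
  ((List.range 3).foldl (fun (s : List pvMat × pvMat) _ =>
    let temp := pvRotA s.2
    (s.1 ++ [temp], temp)) ([t], t)).1

-- A's matching double loop with used/full flag lists (the inner `for rotate in rotated: … break`
-- is the membership test)
def pvInnerA (e : pvReg) (ei : Nat) :
    List (pvReg × Nat) → List Bool × List Bool × Int → List Bool × List Bool × Int
  | [], st => st
  | (b, bi) :: rest, (used, full, ans) =>
    if e.length = b.length ∧ used.getD bi false = false ∧ full.getD ei false = false then
      let te := pvCover e
      let rotated := pvRotates (pvCover b)
      if te ∈ rotated then
        pvInnerA e ei rest (used.set bi true, full.set ei true, ans + (e.length : Int))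
      else
        pvInnerA e ei rest (used, full, ans)
    else
      pvInnerA e ei rest (used, full, ans)

def pvOuterA (ebs : List (pvReg × Nat)) :
    List (pvReg × Nat) → List Bool × List Bool × Int → Int
  | [], st => st.2.2
  | (e, ei) :: rest, st => pvOuterA ebs rest (pvInnerA e ei ebs st)

def solution (game_board : List (List Int)) (table : List (List Int)) : Int :=
  let n := game_board.length
  -- the single i,j scan discovers empty regions (game_board) and block regions (table) in step
  let st := (pvIdx n).foldl
    (fun (s : (pvMat × List pvReg) × (pvMat × List pvReg)) ij =>
      (pvScanStep n 0 s.1 ij, pvScanStep n 1 s.2 ij)) ((game_board, []), (table, []))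
  let empty_list := st.1.2
  let block_list := st.2.2
  pvOuterA block_list.zipIdx empty_list.zipIdx
    (List.replicate block_list.length false, List.replicate empty_list.length false, 0)

-- ===== PORT B =====
-- per-grid region extraction (B runs the same BFS over a private copy of each grid)
def pvRegions (g : pvMat) (n : Nat) (val : Int) : List pvReg :=
  ((pvIdx n).foldl (pvScanStep n val) (g, [])).2

-- B's _shape: bounding box by plain min/max folds, entries by set membership
def pvShape (cells : pvReg) : pvMat :=
  match cells with
  | [] => []
  | c :: cs =>
    let mini := cs.foldl (fun b x => min b x.1) c.1
    let minj := cs.foldl (fun b x => min b x.2) c.2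
    let maxi := cs.foldl (fun b x => max b x.1) c.1
    let maxj := cs.foldl (fun b x => max b x.2) c.2
    let s := PySem.Set.ofList cells
    (List.range (maxi - mini + 1)).map (fun i =>
      (List.range (maxj - minj + 1)).map (fun j =>
        if (mini + i, minj + j) ∈ s then (1 : Int) else 0))

-- B's _rot: one 90° rotation by comprehension
def pvRotB (m : pvMat) : pvMat :=
  let h := m.length
  let w := (m.getD 0 []).length
  (List.range w).map (fun j => (List.range h).map (fun k => (m.getD (h - 1 - k) []).getD j 0))

-- B's _canon: lexicographic minimum of the four rotations (Python tuple comparison = List lex order)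
def pvCanon (cells : pvReg) : pvMat :=
  let m0 := pvShape cells
  ((List.range 3).foldl (fun (s : pvMat × pvMat) _ =>
    let m := pvRotB s.1
    (m, if m < s.2 then m else s.2)) (m0, m0)).2

abbrev pvKeyT : Type := Int × pvMat

def pvKey (cells : pvReg) : pvKeyT := ((cells.length : Int), pvCanon cells)

def solution_alt (game_board : List (List Int)) (table : List (List Int)) : Int :=
  let n := game_board.length
  let empties := pvRegions game_board n 0
  let blocks := pvRegions table n 1
  let bucket := blocks.foldl (fun (d : PySem.Dict pvKeyT Int) b =>
    let k := pvKey b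
    d.insert k (d.getD k 0 + 1)) PySem.Dict.empty
  (empties.foldl (fun (st : PySem.Dict pvKeyT Int × Int) e =>
    let k := pvKey e
    if st.1.getD k 0 > 0 then (st.1.insert k (st.1.getD k 0 - 1), st.2 + (e.length : Int))
    else st) (bucket, 0)).2

-- ===== PRECONDITION & SPEC =====
-- Pre_ excludes exactly the ragged inputs on which Python A raises IndexError: A indexes both
-- grids at [i][j] for all i,j < len(game_board), so every game_board row, and the first
-- len(game_board) rows of table (which must exist), need at least len(game_board) entries.
def Pre_solution (game_board : List (List Int)) (table : List (List Int)) : Prop :=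
  (∀ r ∈ game_board, game_board.length ≤ r.length) ∧
  game_board.length ≤ table.length ∧
  (∀ r ∈ table.take game_board.length, game_board.length ≤ r.length)
instance (game_board : List (List Int)) (table : List (List Int)) : Decidable (Pre_solution game_board table) := by unfold Pre_solution; infer_instance

def pvWitness_solution : List (List Int) × List (List Int) := ([[0, 0], [2, 0]], [[1, 0], [1, 1]])

def Spec_solution (game_board : List (List Int)) (table : List (List Int)) (out : Int) : Prop := out = solution_alt game_board table
instance (game_board : List (List Int)) (table : List (List Int)) (out : Int) : Decidable (Spec_solution game_board table out) := by unfold Spec_solution; infer_instance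

-- ===== CLAIM (what is proved, stated in full; the proofs are below) =====
def Claim_equal_solution : Prop := ∀ (game_board : List (List Int)) (table : List (List Int)), Dom_solution game_board table → Pre_solution game_board table → Spec_solution game_board table (solution game_board table)

-- ===== LEMMAS AND PROOFS =====

-- ---- generic list utilities ----
theorem pv_getD_set {α : Type} (l : List α) (i j : Nat) (v d : α) :
    (l.set i v).getD j d = if i = j ∧ i < l.length then v else l.getD j d := by
  by_cases h : i = j ∧ i < l.length
  · obtain ⟨rfl, hl⟩ := h
    rw [if_pos ⟨rfl, hl⟩]
    rw [List.getD_eq_getElem _ _ (by simpa using hl)]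
    simp
  · rw [if_neg h]
    simp only [List.getD_eq_getElem?_getD, List.getElem?_set]
    by_cases hij : i = j
    · subst hij
      have hni : ¬ i < l.length := fun hh => h ⟨rfl, hh⟩
      simp [hni]
    · simp [hij]

theorem pv_getD_replicate {α : Type} (n j : Nat) (a : α) :
    (List.replicate n a).getD j a = a := by
  simp only [List.getD_eq_getElem?_getD, List.getElem?_replicate]
  split_ifs <;> rfl

theorem pv_foldl_minBy (sel : pvCell → Nat) :
    ∀ (rs : List pvCell) (r0 : pvCell),
      sel (rs.foldl (fun b c => if sel c < sel b then c else b) r0)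
        = rs.foldl (fun b x => min b (sel x)) (sel r0) := by
  intro rs
  induction rs with
  | nil => intro r0; rfl
  | cons c cs ih =>
    intro r0
    simp only [List.foldl_cons]
    rw [ih]
    congr 1
    by_cases h : sel c < sel r0 <;> simp [h, min_def]


theorem pv_foldl_maxBy (sel : pvCell → Nat) :
    ∀ (rs : List pvCell) (r0 : pvCell),
      sel (rs.foldl (fun b c => if sel b < sel c then c else b) r0)
        = rs.foldl (fun b x => max b (sel x)) (sel r0) := by
  intro rs
  induction rs with
  | nil => intro r0; rfl
  | cons c cs ih =>
    intro r0
    simp only [List.foldl_cons]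
    rw [ih]
    congr 1
    by_cases h : sel r0 < sel c <;> simp [h, max_def] <;> omega


theorem pv_foldl_min_sel (sel : pvCell → Nat) (rs : List pvCell) (a : Nat) :
    rs.foldl (fun b x => min b (sel x)) a = (rs.map sel).foldl min a := by
  rw [List.foldl_map]

theorem pv_foldl_max_sel (sel : pvCell → Nat) (rs : List pvCell) (a : Nat) :
    rs.foldl (fun b x => max b (sel x)) a = (rs.map sel).foldl max a := by
  rw [List.foldl_map]

-- ---- matrix accessor ----
def pvAt (m : pvMat) (a b : Nat) : Int := (m.getD a []).getD b 0

def pvRect (m : pvMat) (h w : Nat) : Prop :=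
  m.length = h ∧ ∀ a, a < h → (m.getD a []).length = w

theorem pvAt_getElem (m : pvMat) (a b : Nat) (ha : a < m.length) (hb : b < m[a].length) :
    m[a][b] = pvAt m a b := by
  unfold pvAt
  rw [List.getD_eq_getElem m [] ha, List.getD_eq_getElem _ 0 hb]

-- ---- the cover fill loop ----
theorem pv_coverFold_len (oi oj : Nat) :
    ∀ (l : List pvCell) (m : pvMat),
      (l.foldl (fun m c => m.set (c.1 - oi) ((m.getD (c.1 - oi) []).set (c.2 - oj) 1)) m).length = m.length := by
  intro l
  induction l with
  | nil => intro m; rfl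
  | cons c cs ih => intro m; simp only [List.foldl_cons]; rw [ih]; simp

theorem pv_coverFold_rowlen (oi oj : Nat) :
    ∀ (l : List pvCell) (m : pvMat) (a : Nat),
      ((l.foldl (fun m c => m.set (c.1 - oi) ((m.getD (c.1 - oi) []).set (c.2 - oj) 1)) m).getD a []).length
        = (m.getD a []).length := by
  intro l
  induction l with
  | nil => intro m a; rfl
  | cons c cs ih =>
    intro m a
    simp only [List.foldl_cons]
    rw [ih]
    rw [pv_getD_set]
    split_ifs with h
    · rw [List.length_set, h.1]
    · rfl

theorem pv_coverFold_at (oi oj : Nat) :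
    ∀ (l : List pvCell) (m : pvMat),
      (∀ c ∈ l, c.1 - oi < m.length ∧ c.2 - oj < (m.getD (c.1 - oi) []).length) →
      ∀ (a b : Nat),
        pvAt (l.foldl (fun m c => m.set (c.1 - oi) ((m.getD (c.1 - oi) []).set (c.2 - oj) 1)) m) a b
          = if ∃ c ∈ l, c.1 - oi = a ∧ c.2 - oj = b then 1 else pvAt m a b := by
  intro l
  induction l with
  | nil => intro m _ a b; simp
  | cons c0 cs ih =>
    intro m hm a b
    simp only [List.foldl_cons]
    set m' := m.set (c0.1 - oi) ((m.getD (c0.1 - oi) []).set (c0.2 - oj) 1) with hm'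
    have hlen : ∀ a, (m'.getD a []).length = (m.getD a []).length := by
      intro a
      rw [hm', pv_getD_set]
      split_ifs with h
      · rw [List.length_set, h.1]
      · rfl
    have hm2 : ∀ c ∈ cs, c.1 - oi < m'.length ∧ c.2 - oj < (m'.getD (c.1 - oi) []).length := by
      intro c hc
      have := hm c (List.mem_cons_of_mem _ hc)
      constructor
      · rw [hm', List.length_set]; exact this.1
      · rw [hlen]; exact this.2
    rw [ih m' hm2 a b]
    have hc0 := hm c0 (List.mem_cons_self ..)
    have hat : pvAt m' a b = if (c0.1 - oi) = a ∧ (c0.2 - oj) = b then 1 else pvAt m a b := by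
      unfold pvAt
      rw [hm', pv_getD_set]
      by_cases h1 : (c0.1 - oi) = a
      · rw [if_pos ⟨h1, hc0.1⟩]
        rw [pv_getD_set]
        by_cases h2 : (c0.2 - oj) = b
        · rw [if_pos ⟨h2, hc0.2⟩, if_pos ⟨h1, h2⟩]
        · rw [if_neg (fun hh => h2 hh.1), if_neg (fun hh => h2 hh.2), h1]
      · rw [if_neg (fun hh => h1 hh.1), if_neg (fun hh => h1 hh.1)]
    rw [hat]
    by_cases hex : ∃ c ∈ cs, c.1 - oi = a ∧ c.2 - oj = b
    · simp only [if_pos hex]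
      have : ∃ c ∈ c0 :: cs, c.1 - oi = a ∧ c.2 - oj = b := by
        obtain ⟨c, hc, hpq⟩ := hex
        exact ⟨c, List.mem_cons_of_mem _ hc, hpq⟩
      rw [if_pos this]
    · simp only [if_neg hex]
      by_cases h0 : (c0.1 - oi) = a ∧ (c0.2 - oj) = b
      · rw [if_pos h0, if_pos ⟨c0, List.mem_cons_self .., h0⟩]
      · rw [if_neg h0]
        rw [if_neg]
        intro ⟨c, hc, hpq⟩
        rcases List.mem_cons.1 hc with h | h
        · exact h0 (h ▸ hpq)
        · exact hex ⟨c, h, hpq⟩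


-- ---- cover = shape ----
theorem pv_cover_eq_shape (cells : pvReg) : pvCover cells = pvShape cells := by
  cases cells with
  | nil => rfl
  | cons c cs =>
    show _ = _
    simp only [pvCover, pvShape]
    rw [pv_foldl_minBy Prod.fst cs c, pv_foldl_minBy Prod.snd cs c,
        pv_foldl_maxBy Prod.fst cs c, pv_foldl_maxBy Prod.snd cs c]
    set mini := cs.foldl (fun b x => min b x.1) c.1 with hmini
    set minj := cs.foldl (fun b x => min b x.2) c.2 with hminj
    set maxi := cs.foldl (fun b x => max b x.1) c.1 with hmaxi
    set maxj := cs.foldl (fun b x => max b x.2) c.2 with hmaxj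
    have hlo : ∀ x ∈ c :: cs, mini ≤ x.1 ∧ minj ≤ x.2 := by
      intro x hx
      have h1 := PySem.List.foldl_min_le (cs.map Prod.fst) c.1
      have h2 := PySem.List.foldl_min_le (cs.map Prod.snd) c.2
      rw [hmini, hminj, pv_foldl_min_sel Prod.fst, pv_foldl_min_sel Prod.snd]
      rcases List.mem_cons.1 hx with rfl | hx
      · exact ⟨h1.1, h2.1⟩
      · exact ⟨h1.2 x.1 (List.mem_map_of_mem hx), h2.2 x.2 (List.mem_map_of_mem hx)⟩
    have hhi : ∀ x ∈ c :: cs, x.1 ≤ maxi ∧ x.2 ≤ maxj := by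
      intro x hx
      have h1 := PySem.List.le_foldl_max (cs.map Prod.fst) c.1
      have h2 := PySem.List.le_foldl_max (cs.map Prod.snd) c.2
      rw [hmaxi, hmaxj, pv_foldl_max_sel Prod.fst, pv_foldl_max_sel Prod.snd]
      rcases List.mem_cons.1 hx with rfl | hx
      · exact ⟨h1.1, h2.1⟩
      · exact ⟨h1.2 x.1 (List.mem_map_of_mem hx), h2.2 x.2 (List.mem_map_of_mem hx)⟩
    set H := maxi - mini + 1 with hH
    set W := maxj - minj + 1 with hW
    set st : pvMat := List.replicate H (List.replicate W (0 : Int)) with hst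
    have hstrow : ∀ a, a < H → st.getD a [] = List.replicate W (0 : Int) := by
      intro a ha
      rw [hst, List.getD_eq_getElem _ _ (by simpa using ha), List.getElem_replicate]
    have hbnd : ∀ x ∈ c :: cs, x.1 - mini < st.length ∧ x.2 - minj < (st.getD (x.1 - mini) []).length := by
      intro x hx
      have h1 : x.1 - mini < H := by have := (hlo x hx).1; have := (hhi x hx).1; omega
      refine ⟨by simpa [hst] using h1, ?_⟩
      rw [hstrow _ h1, List.length_replicate]
      have := (hlo x hx).2; have := (hhi x hx).2; omega
    apply List.ext_getElem
    · rw [pv_coverFold_len]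
      simp [hst]
    · intro a ha1 ha2
      have haH : a < H := by
        have := ha1
        rw [pv_coverFold_len, hst, List.length_replicate] at this
        exact this
      have hrowlenL : ((List.foldl (fun m c => m.set (c.1 - mini) ((m.getD (c.1 - mini) []).set (c.2 - minj) 1)) st (c :: cs)).getD a []).length = W := by
        rw [pv_coverFold_rowlen, hstrow _ haH, List.length_replicate]
      apply List.ext_getElem
      · rw [← List.getD_eq_getElem _ [] ha1, hrowlenL]
        simp
      · intro b hb1 hb2
        have hbW : b < W := by
          rw [← List.getD_eq_getElem _ [] ha1, hrowlenL] at hb1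
          exact hb1
        rw [pvAt_getElem _ _ _ ha1 hb1, pvAt_getElem _ _ _ ha2 hb2]
        rw [pv_coverFold_at mini minj (c :: cs) st hbnd a b]
        have hshape : pvAt ((List.range H).map (fun i => (List.range W).map (fun j => if (mini + i, minj + j) ∈ PySem.Set.ofList (c :: cs) then (1 : Int) else 0))) a b
            = if (mini + a, minj + b) ∈ (c :: cs) then (1 : Int) else 0 := by
          have hrowa : ((List.range H).map (fun i => (List.range W).map (fun j => if (mini + i, minj + j) ∈ PySem.Set.ofList (c :: cs) then (1 : Int) else 0))).getD a []
              = (List.range W).map (fun j => if (mini + a, minj + j) ∈ PySem.Set.ofList (c :: cs) then (1 : Int) else 0) := by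
            rw [List.getD_eq_getElem _ _ (by simpa using haH)]
            simp
          unfold pvAt
          rw [hrowa, List.getD_eq_getElem _ _ (by simpa using hbW)]
          simp [PySem.Set.mem_ofList]
        rw [hshape]
        have hstat : pvAt st a b = 0 := by
          unfold pvAt
          rw [hstrow _ haH]
          rw [List.getD_eq_getElem _ _ (by simpa using hbW), List.getElem_replicate]
        rw [hstat]
        congr 1
        · apply propext
          constructor
          · rintro ⟨x, hx, h1, h2⟩
            have := (hlo x hx)
            have hx1 : x.1 = mini + a := by omega
            have hx2 : x.2 = minj + b := by omega
            have : x = (mini + a, minj + b) := Prod.ext hx1 hx2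
            exact this ▸ hx
          · intro hmem
            exact ⟨(mini + a, minj + b), hmem, by omega, by omega⟩

-- ---- matrix extensionality through pvAt ----
theorem pv_mat_ext (m1 m2 : pvMat) (h w : Nat) (h1 : pvRect m1 h w) (h2 : pvRect m2 h w)
    (hat : ∀ a b, a < h → b < w → pvAt m1 a b = pvAt m2 a b) : m1 = m2 := by
  apply List.ext_getElem
  · rw [h1.1, h2.1]
  · intro a ha1 ha2
    have haH : a < h := by rw [h1.1] at ha1; exact ha1
    apply List.ext_getElem
    · rw [← List.getD_eq_getElem m1 [] ha1, ← List.getD_eq_getElem m2 [] ha2,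
          h1.2 a haH, h2.2 a haH]
    · intro b hb1 hb2
      have hbW : b < w := by
        rw [← List.getD_eq_getElem m1 [] ha1, h1.2 a haH] at hb1; exact hb1
      rw [pvAt_getElem m1 a b ha1 hb1, pvAt_getElem m2 a b ha2 hb2]
      exact hat a b haH hbW

-- ---- B's rotation: dimensions and entries ----
theorem pv_rotB_rect (m : pvMat) (h w : Nat) (hr : pvRect m h w) (hh : 0 < h) :
    pvRect (pvRotB m) w h := by
  have hw0 : (m.getD 0 []).length = w := hr.2 0 hh
  constructor
  · unfold pvRotB
    simp only [List.length_map, List.length_range]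
    exact hw0
  · intro a ha
    unfold pvRotB
    rw [hw0, hr.1]
    rw [List.getD_eq_getElem _ _ (by simpa using ha)]
    simp

theorem pv_rotB_at (m : pvMat) (h w : Nat) (hr : pvRect m h w) (hh : 0 < h)
    (j k : Nat) (hj : j < w) (hk : k < h) :
    pvAt (pvRotB m) j k = pvAt m (h - 1 - k) j := by
  have hw0 : (m.getD 0 []).length = w := hr.2 0 hh
  unfold pvRotB pvAt
  rw [hw0, hr.1]
  have hrow : (List.map (fun j => List.map (fun k => (m.getD (h - 1 - k) []).getD j 0) (List.range h)) (List.range w)).getD j []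
      = List.map (fun k => (m.getD (h - 1 - k) []).getD j 0) (List.range h) := by
    rw [List.getD_eq_getElem _ _ (by simpa using hj)]
    simp
  rw [hrow, List.getD_eq_getElem _ _ (by simpa using hk)]
  simp only [List.getElem_map, List.getElem_range]

theorem pv_rotB_rotB_at (m : pvMat) (h w : Nat) (hr : pvRect m h w) (hh : 0 < h) (hw : 0 < w)
    (a b : Nat) (ha : a < h) (hb : b < w) :
    pvAt (pvRotB (pvRotB m)) a b = pvAt m (h - 1 - a) (w - 1 - b) := by
  have hr1 : pvRect (pvRotB m) w h := pv_rotB_rect m h w hr hh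
  rw [pv_rotB_at (pvRotB m) w h hr1 hw a b ha hb]
  rw [pv_rotB_at m h w hr hh (w - 1 - b) a (by omega) ha]

theorem pv_rot4 (m : pvMat) (h w : Nat) (hr : pvRect m h w) (hh : 0 < h) (hw : 0 < w) :
    pvRotB (pvRotB (pvRotB (pvRotB m))) = m := by
  have hr1 : pvRect (pvRotB m) w h := pv_rotB_rect m h w hr hh
  have hr2 : pvRect (pvRotB (pvRotB m)) h w := pv_rotB_rect _ w h hr1 hw
  have hr3 : pvRect (pvRotB (pvRotB (pvRotB m))) w h := pv_rotB_rect _ h w hr2 hh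
  have hr4 : pvRect (pvRotB (pvRotB (pvRotB (pvRotB m)))) h w := pv_rotB_rect _ w h hr3 hw
  apply pv_mat_ext _ _ h w hr4 hr
  intro a b ha hb
  rw [pv_rotB_rotB_at (pvRotB (pvRotB m)) h w hr2 hh hw a b ha hb]
  rw [pv_rotB_rotB_at m h w hr hh hw (h - 1 - a) (w - 1 - b) (by omega) (by omega)]
  congr 1 <;> omega

-- ---- A's rotation equals B's ----
theorem pv_rotA_inner (m : pvMat) (h w i : Nat) :
    ∀ (js : List Nat) (tmp : pvMat), pvRect tmp w h → (∀ j ∈ js, j < w) → 0 < h →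
      pvRect (js.foldl (fun tmp j => tmp.set j ((tmp.getD j []).set (h - 1 - i) ((m.getD i []).getD j 0))) tmp) w h
      ∧ ∀ j k, j < w → k < h →
        pvAt (js.foldl (fun tmp j => tmp.set j ((tmp.getD j []).set (h - 1 - i) ((m.getD i []).getD j 0))) tmp) j k
          = if j ∈ js ∧ k = h - 1 - i then (m.getD i []).getD j 0 else pvAt tmp j k := by
  intro js
  induction js with
  | nil =>
    intro tmp hrect _ _
    exact ⟨hrect, fun j k _ _ => by simp⟩
  | cons j0 js ih =>
    intro tmp hrect hjs hh
    have hj0 : j0 < w := hjs j0 (List.mem_cons_self ..)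
    simp only [List.foldl_cons]
    set tmp' := tmp.set j0 ((tmp.getD j0 []).set (h - 1 - i) ((m.getD i []).getD j0 0)) with htmp'
    have hrownew : ∀ a, a < w → (tmp'.getD a []).length = h := by
      intro a ha
      rw [htmp', pv_getD_set]
      split_ifs with hcond
      · rw [List.length_set]
        exact hrect.2 j0 hj0
      · exact hrect.2 a ha
    have hrect' : pvRect tmp' w h := by
      refine ⟨by rw [htmp', List.length_set, hrect.1], hrownew⟩
    obtain ⟨ihrect, ihat⟩ := ih tmp' hrect' (fun j hj => hjs j (List.mem_cons_of_mem _ hj)) hh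
    refine ⟨ihrect, ?_⟩
    intro j k hj hk
    rw [ihat j k hj hk]
    have hat' : pvAt tmp' j k = if j0 = j ∧ k = h - 1 - i then (m.getD i []).getD j 0 else pvAt tmp j k := by
      unfold pvAt
      rw [htmp', pv_getD_set]
      by_cases h1 : j0 = j
      · rw [if_pos ⟨h1, by rw [hrect.1]; exact hj0⟩]
        rw [pv_getD_set]
        by_cases h2 : k = h - 1 - i
        · rw [if_pos ⟨h2.symm, by rw [hrect.2 j0 hj0]; omega⟩, if_pos ⟨h1, h2⟩, h1]
        · rw [if_neg (fun hh2 => h2 hh2.1.symm), if_neg (fun hh2 => h2 hh2.2), h1]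
      · rw [if_neg (fun hh1 => h1 hh1.1), if_neg (fun hh1 => h1 hh1.1)]
    rw [hat']
    by_cases hmem : j ∈ js ∧ k = h - 1 - i
    · rw [if_pos hmem, if_pos ⟨List.mem_cons_of_mem _ hmem.1, hmem.2⟩]
    · rw [if_neg hmem]
      by_cases h0 : j0 = j ∧ k = h - 1 - i
      · rw [if_pos h0, if_pos ⟨h0.1 ▸ List.mem_cons_self .., h0.2⟩]
      · rw [if_neg h0, if_neg]
        intro ⟨hmem2, hk2⟩
        rcases List.mem_cons.1 hmem2 with rfl | hmem3
        · exact h0 ⟨rfl, hk2⟩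
        · exact hmem ⟨hmem3, hk2⟩

theorem pv_rotA_outer (m : pvMat) (h w : Nat) (hh : 0 < h) (_hw : 0 < w) :
    ∀ (is : List Nat) (tmp : pvMat), pvRect tmp w h → (∀ i ∈ is, i < h) →
      pvRect (is.foldl (fun tmp i => (List.range w).foldl (fun tmp j => tmp.set j ((tmp.getD j []).set (h - 1 - i) ((m.getD i []).getD j 0))) tmp) tmp) w h
      ∧ ∀ j k, j < w → k < h →
        pvAt (is.foldl (fun tmp i => (List.range w).foldl (fun tmp j => tmp.set j ((tmp.getD j []).set (h - 1 - i) ((m.getD i []).getD j 0))) tmp) tmp) j k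
          = if ∃ i ∈ is, k = h - 1 - i then pvAt m (h - 1 - k) j else pvAt tmp j k := by
  intro is
  induction is with
  | nil =>
    intro tmp hrect _
    exact ⟨hrect, fun j k _ _ => by simp⟩
  | cons i0 is ih =>
    intro tmp hrect his
    have hi0 : i0 < h := his i0 (List.mem_cons_self ..)
    simp only [List.foldl_cons]
    obtain ⟨hrect', hat'⟩ := pv_rotA_inner m h w i0 (List.range w) tmp hrect (fun j hj => by simpa using hj) hh
    obtain ⟨ihrect, ihat⟩ := ih _ hrect' (fun i hi => his i (List.mem_cons_of_mem _ hi))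
    refine ⟨ihrect, ?_⟩
    intro j k hj hk
    rw [ihat j k hj hk]
    by_cases hmem : ∃ i ∈ is, k = h - 1 - i
    · rw [if_pos hmem, if_pos (by obtain ⟨i, hi, hki⟩ := hmem; exact ⟨i, List.mem_cons_of_mem _ hi, hki⟩)]
    · rw [if_neg hmem, hat' j k hj hk]
      by_cases h0 : k = h - 1 - i0
      · rw [if_pos ⟨by simpa using hj, h0⟩, if_pos ⟨i0, List.mem_cons_self .., h0⟩]
        have : i0 = h - 1 - k := by omega
        rw [← this]
        rfl
      · rw [if_neg (fun hc => h0 hc.2), if_neg]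
        intro ⟨i, hi, hki⟩
        rcases List.mem_cons.1 hi with rfl | hi2
        · exact h0 hki
        · exact hmem ⟨i, hi2, hki⟩

theorem pv_rotA_eq_rotB (m : pvMat) (h w : Nat) (hr : pvRect m h w) (hh : 0 < h) (hw : 0 < w) :
    pvRotA m = pvRotB m := by
  have hw0 : (m.getD 0 []).length = w := hr.2 0 hh
  have hst : pvRect (List.replicate w (List.replicate h (0 : Int))) w h := by
    constructor
    · simp
    · intro a ha
      rw [List.getD_eq_getElem _ _ (by simpa using ha), List.getElem_replicate, List.length_replicate]
  obtain ⟨hrect, hat⟩ := pv_rotA_outer m h w hh hw (List.range h)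
    (List.replicate w (List.replicate h (0 : Int))) hst (fun i hi => by simpa using hi)
  have hgoal : pvRotA m = (List.range h).foldl (fun tmp i => (List.range w).foldl (fun tmp j => tmp.set j ((tmp.getD j []).set (h - 1 - i) ((m.getD i []).getD j 0))) tmp) (List.replicate w (List.replicate h (0 : Int))) := by
    unfold pvRotA
    rw [hr.1, hw0]
  rw [hgoal]
  apply pv_mat_ext _ _ w h hrect (pv_rotB_rect m h w hr hh)
  intro a b ha hb
  rw [hat a b ha hb, pv_rotB_at m h w hr hh a b ha hb,
      if_pos (⟨h - 1 - b, by simp only [List.mem_range]; omega, by omega⟩ : ∃ i ∈ List.range h, b = h - 1 - i)]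

-- ---- the four rotations and the canonical form ----
def pvGood (m : pvMat) : Prop := ∃ h w, 0 < h ∧ 0 < w ∧ pvRect m h w

def pvRotsL (m : pvMat) : List pvMat :=
  [m, pvRotB m, pvRotB (pvRotB m), pvRotB (pvRotB (pvRotB m))]

def pvCanonM (m : pvMat) : pvMat :=
  min (min (min m (pvRotB m)) (pvRotB (pvRotB m))) (pvRotB (pvRotB (pvRotB m)))

theorem pv_good_rotB (m : pvMat) (hg : pvGood m) : pvGood (pvRotB m) := by
  obtain ⟨h, w, hh, hw, hr⟩ := hg
  exact ⟨w, h, hw, hh, pv_rotB_rect m h w hr hh⟩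

theorem pv_rot4_good (m : pvMat) (hg : pvGood m) :
    pvRotB (pvRotB (pvRotB (pvRotB m))) = m := by
  obtain ⟨h, w, hh, hw, hr⟩ := hg
  exact pv_rot4 m h w hr hh hw

theorem pv_rotates_eq (m : pvMat) (hg : pvGood m) : pvRotates m = pvRotsL m := by
  obtain ⟨h, w, hh, hw, hr⟩ := hg
  have h1 : pvRotA m = pvRotB m := pv_rotA_eq_rotB m h w hr hh hw
  have h2 : pvRotA (pvRotB m) = pvRotB (pvRotB m) :=
    pv_rotA_eq_rotB _ w h (pv_rotB_rect m h w hr hh) hw hh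
  have h3 : pvRotA (pvRotB (pvRotB m)) = pvRotB (pvRotB (pvRotB m)) :=
    pv_rotA_eq_rotB _ h w (pv_rotB_rect _ w h (pv_rotB_rect m h w hr hh) hw) hh hw
  have hr3 : List.range 3 = [0, 1, 2] := rfl
  unfold pvRotates
  rw [hr3]
  simp only [List.foldl_cons, List.foldl_nil]
  rw [h1, h2, h3]
  rfl

theorem pv_if_lt_min (a b : pvMat) : (if a < b then a else b) = min b a := by
  by_cases h : a < b
  · rw [if_pos h, min_eq_right (le_of_lt h)]
  · rw [if_neg h, min_eq_left (not_lt.mp h)]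

theorem pv_canon_eq_canonM (cells : pvReg) : pvCanon cells = pvCanonM (pvShape cells) := by
  unfold pvCanon pvCanonM
  have hr3 : List.range 3 = [0, 1, 2] := rfl
  rw [hr3]
  simp only [List.foldl_cons, List.foldl_nil]
  rw [pv_if_lt_min, pv_if_lt_min, pv_if_lt_min]

theorem pv_canonM_mem (m : pvMat) : pvCanonM m ∈ pvRotsL m := by
  unfold pvCanonM pvRotsL
  rcases min_choice (min (min m (pvRotB m)) (pvRotB (pvRotB m))) (pvRotB (pvRotB (pvRotB m))) with h | h <;> rw [h]
  · rcases min_choice (min m (pvRotB m)) (pvRotB (pvRotB m)) with h2 | h2 <;> rw [h2]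
    · rcases min_choice m (pvRotB m) with h3 | h3 <;> rw [h3] <;> simp
    · simp
  · simp

theorem pv_canonM_rot (m : pvMat) (hg : pvGood m) : pvCanonM (pvRotB m) = pvCanonM m := by
  unfold pvCanonM
  rw [pv_rot4_good m hg]
  have hac : ∀ a b c d : pvMat, min (min (min a b) c) d = min (min (min d a) b) c := by
    intro a b c d
    rw [min_comm _ d, ← min_assoc, ← min_assoc]
  exact hac (pvRotB m) (pvRotB (pvRotB m)) (pvRotB (pvRotB (pvRotB m))) m

theorem pv_mem_rotsL_iff (Z m : pvMat) :
    Z ∈ pvRotsL m ↔ Z = m ∨ Z = pvRotB m ∨ Z = pvRotB (pvRotB m) ∨ Z = pvRotB (pvRotB (pvRotB m)) := by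
  simp [pvRotsL]

theorem pv_mem_rots_symm (m Z : pvMat) (hg : pvGood m) (h : Z ∈ pvRotsL m) : m ∈ pvRotsL Z := by
  have h4 := pv_rot4_good m hg
  rcases (pv_mem_rotsL_iff Z m).1 h with rfl | rfl | rfl | rfl
  · exact List.mem_cons_self ..
  · rw [pv_mem_rotsL_iff]
    right; right; right
    rw [h4]
  · rw [pv_mem_rotsL_iff]
    right; right; left
    rw [h4]
  · rw [pv_mem_rotsL_iff]
    right; left
    rw [h4]

theorem pv_rot_mem_rots (m Z : pvMat) (hg : pvGood m) (h : Z ∈ pvRotsL m) :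
    pvRotB Z ∈ pvRotsL m := by
  have h4 := pv_rot4_good m hg
  rw [pv_mem_rotsL_iff] at h ⊢
  rcases h with rfl | rfl | rfl | rfl
  · exact Or.inr (Or.inl rfl)
  · exact Or.inr (Or.inr (Or.inl rfl))
  · exact Or.inr (Or.inr (Or.inr rfl))
  · rw [h4]; exact Or.inl rfl

theorem pv_mem_rots_trans (m Z W : pvMat) (hg : pvGood m)
    (h1 : Z ∈ pvRotsL m) (h2 : W ∈ pvRotsL Z) : W ∈ pvRotsL m := by
  rw [pv_mem_rotsL_iff] at h2
  rcases h2 with rfl | rfl | rfl | rfl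
  · exact h1
  · exact pv_rot_mem_rots m Z hg h1
  · exact pv_rot_mem_rots m _ hg (pv_rot_mem_rots m Z hg h1)
  · exact pv_rot_mem_rots m _ hg (pv_rot_mem_rots m _ hg (pv_rot_mem_rots m Z hg h1))

theorem pv_mem_rots_iff_canon (S T : pvMat) (hgS : pvGood S) (hgT : pvGood T) :
    S ∈ pvRotsL T ↔ pvCanonM S = pvCanonM T := by
  constructor
  · intro h
    rcases (pv_mem_rotsL_iff S T).1 h with rfl | rfl | rfl | rfl
    · rfl
    · exact pv_canonM_rot T hgT
    · rw [pv_canonM_rot _ (pv_good_rotB T hgT), pv_canonM_rot T hgT]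
    · rw [pv_canonM_rot _ (pv_good_rotB _ (pv_good_rotB T hgT)),
          pv_canonM_rot _ (pv_good_rotB T hgT), pv_canonM_rot T hgT]
  · intro h
    have h1 : pvCanonM S ∈ pvRotsL S := pv_canonM_mem S
    have h2 : pvCanonM T ∈ pvRotsL T := pv_canonM_mem T
    have h3 : S ∈ pvRotsL (pvCanonM S) := pv_mem_rots_symm S (pvCanonM S) hgS h1
    rw [h] at h3
    exact pv_mem_rots_trans T (pvCanonM T) S hgT h2 h3

theorem pv_good_shape (cells : pvReg) (hne : cells ≠ []) : pvGood (pvShape cells) := by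
  cases cells with
  | nil => exact absurd rfl hne
  | cons c cs =>
    have hlen : (pvShape (c :: cs)).length
        = cs.foldl (fun b x => max b x.1) c.1 - cs.foldl (fun b x => min b x.1) c.1 + 1 := by
      simp [pvShape]
    have hrow : ∀ a, a < (pvShape (c :: cs)).length → ((pvShape (c :: cs)).getD a []).length
        = cs.foldl (fun b x => max b x.2) c.2 - cs.foldl (fun b x => min b x.2) c.2 + 1 := by
      intro a ha
      unfold pvShape
      rw [List.getD_eq_getElem _ _ (by simpa [pvShape] using ha)]
      simp
    exact ⟨_, _, Nat.succ_pos _, Nat.succ_pos _, hlen,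
      fun a ha => hrow a (by rw [hlen]; exact ha)⟩

-- unfolding equations for the matching recursions
theorem pvInnerA_cons (e : pvReg) (ei : Nat) (b : pvReg) (bi : Nat) (rest : List (pvReg × Nat))
    (used full : List Bool) (ans : Int) :
    pvInnerA e ei ((b, bi) :: rest) (used, full, ans)
      = if e.length = b.length ∧ used.getD bi false = false ∧ full.getD ei false = false then
          (if pvCover e ∈ pvRotates (pvCover b) then
            pvInnerA e ei rest (used.set bi true, full.set ei true, ans + (e.length : Int))
          else pvInnerA e ei rest (used, full, ans))
        else pvInnerA e ei rest (used, full, ans) := rfl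

theorem pvOuterA_cons (ebs : List (pvReg × Nat)) (e : pvReg) (ei : Nat)
    (rest : List (pvReg × Nat)) (st : List Bool × List Bool × Int) :
    pvOuterA ebs ((e, ei) :: rest) st = pvOuterA ebs rest (pvInnerA e ei ebs st) := rfl

-- ---- B's per-empty step (the exact fold body of solution_alt) ----
def pvBStep (st : PySem.Dict pvKeyT Int × Int) (e : pvReg) : PySem.Dict pvKeyT Int × Int :=
  let k := pvKey e
  if st.1.getD k 0 > 0 then (st.1.insert k (st.1.getD k 0 - 1), st.2 + (e.length : Int)) else st

-- A's per-pair match test is exactly key equality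
theorem pv_match_iff (e b : pvReg) (he : e ≠ []) (hb : b ≠ []) :
    (e.length = b.length ∧ pvCover e ∈ pvRotates (pvCover b)) ↔ pvKey e = pvKey b := by
  rw [pv_cover_eq_shape e, pv_cover_eq_shape b, pv_rotates_eq _ (pv_good_shape b hb),
      pv_mem_rots_iff_canon _ _ (pv_good_shape e he) (pv_good_shape b hb)]
  simp [pvKey, Prod.ext_iff, pv_canon_eq_canonM]

theorem pv_innerA_noop (e : pvReg) (ei : Nat) :
    ∀ (ebs : List (pvReg × Nat)) (used full : List Bool) (ans : Int),
      full.getD ei false = true →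
      pvInnerA e ei ebs (used, full, ans) = (used, full, ans) := by
  intro ebs
  induction ebs with
  | nil => intro used full ans _; rfl
  | cons p rest ih =>
    intro used full ans hfull
    obtain ⟨b, bi⟩ := p
    rw [pvInnerA_cons, if_neg (by rw [hfull]; rintro ⟨-, -, h⟩; exact absurd h (by decide))]
    exact ih used full ans hfull

def pvCnt (ebs : List (pvReg × Nat)) (used : List Bool) (κ : pvKeyT) : Nat :=
  ebs.countP (fun p => !(used.getD p.2 false) && decide (pvKey p.1 = κ))

theorem pv_innerA_spec (e : pvReg) (ei : Nat) (he : e ≠ []) :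
    ∀ (ebs : List (pvReg × Nat)) (used full : List Bool) (ans : Int),
      (∀ p ∈ ebs, p.1 ≠ []) → (∀ p ∈ ebs, p.2 < used.length) →
      full.getD ei false = false → ei < full.length →
      (pvCnt ebs used (pvKey e) = 0 ∧
        pvInnerA e ei ebs (used, full, ans) = (used, full, ans)) ∨
      (0 < pvCnt ebs used (pvKey e) ∧ ∃ b bi, (b, bi) ∈ ebs ∧ bi < used.length ∧
        used.getD bi false = false ∧ pvKey b = pvKey e ∧
        pvInnerA e ei ebs (used, full, ans)
          = (used.set bi true, full.set ei true, ans + (e.length : Int))) := by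
  intro ebs
  induction ebs with
  | nil =>
    intro used full ans _ _ _ _
    exact Or.inl ⟨rfl, rfl⟩
  | cons p rest ih =>
    intro used full ans hne hlen hfull hei
    obtain ⟨b, bi⟩ := p
    have hbne : b ≠ [] := hne (b, bi) (List.mem_cons_self ..)
    have hbil : bi < used.length := hlen (b, bi) (List.mem_cons_self ..)
    have hcntc : pvCnt ((b, bi) :: rest) used (pvKey e)
        = pvCnt rest used (pvKey e)
          + (if !(used.getD bi false) && decide (pvKey b = pvKey e) then 1 else 0) := by
      unfold pvCnt
      rw [List.countP_cons]
    by_cases hu : used.getD bi false = false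
    · by_cases hk : pvKey b = pvKey e
      · -- first match found here
        have hmm := (pv_match_iff e b he hbne).2 hk.symm
        have hstep : pvInnerA e ei ((b, bi) :: rest) (used, full, ans)
            = pvInnerA e ei rest (used.set bi true, full.set ei true, ans + (e.length : Int)) := by
          rw [pvInnerA_cons, if_pos ⟨hmm.1, hu, hfull⟩, if_pos hmm.2]
        have hrest : pvInnerA e ei rest (used.set bi true, full.set ei true, ans + (e.length : Int))
            = (used.set bi true, full.set ei true, ans + (e.length : Int)) := by
          apply pv_innerA_noop
          rw [pv_getD_set]
          rw [if_pos ⟨rfl, hei⟩]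
        refine Or.inr ⟨?_, b, bi, List.mem_cons_self .., hbil, hu, hk, by rw [hstep, hrest]⟩
        rw [hcntc, if_pos (by rw [hu, hk]; simp)]
        omega
      · -- unused but not a match: skip
        have hstep : pvInnerA e ei ((b, bi) :: rest) (used, full, ans)
            = pvInnerA e ei rest (used, full, ans) := by
          rw [pvInnerA_cons]
          by_cases hlen2 : e.length = b.length
          · rw [if_pos ⟨hlen2, hu, hfull⟩, if_neg (fun hmem => hk (((pv_match_iff e b he hbne).1 ⟨hlen2, hmem⟩).symm))]
          · rw [if_neg (by rintro ⟨h, -, -⟩; exact hlen2 h)]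
        have hcnt0 : pvCnt ((b, bi) :: rest) used (pvKey e) = pvCnt rest used (pvKey e) := by
          rw [hcntc, if_neg (by simp [hk]), Nat.add_zero]
        rw [hstep, hcnt0]
        rcases ih used full ans (fun p hp => hne p (List.mem_cons_of_mem _ hp))
          (fun p hp => hlen p (List.mem_cons_of_mem _ hp)) hfull hei with ⟨h1, h2⟩ | ⟨h1, b', bi', hm, h3, h4, h5, h6⟩
        · exact Or.inl ⟨h1, h2⟩
        · exact Or.inr ⟨h1, b', bi', List.mem_cons_of_mem _ hm, h3, h4, h5, h6⟩
    · -- block already used: skip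
      have hstep : pvInnerA e ei ((b, bi) :: rest) (used, full, ans)
          = pvInnerA e ei rest (used, full, ans) := by
        rw [pvInnerA_cons, if_neg (by rintro ⟨-, h, -⟩; exact hu h)]
      have hcnt0 : pvCnt ((b, bi) :: rest) used (pvKey e) = pvCnt rest used (pvKey e) := by
        rw [hcntc, if_neg (by simp at hu ⊢; simp [hu]), Nat.add_zero]
      rw [hstep, hcnt0]
      rcases ih used full ans (fun p hp => hne p (List.mem_cons_of_mem _ hp))
        (fun p hp => hlen p (List.mem_cons_of_mem _ hp)) hfull hei with ⟨h1, h2⟩ | ⟨h1, b', bi', hm, h3, h4, h5, h6⟩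
      · exact Or.inl ⟨h1, h2⟩
      · exact Or.inr ⟨h1, b', bi', List.mem_cons_of_mem _ hm, h3, h4, h5, h6⟩

-- ---- unused-count bookkeeping ----
theorem pv_cnt_pos (ebs : List (pvReg × Nat)) (used : List Bool) (b0 : pvReg) (bi : Nat)
    (hmem : (b0, bi) ∈ ebs) (hu : used.getD bi false = false) (κ : pvKeyT) (hk : pvKey b0 = κ) :
    0 < pvCnt ebs used κ := by
  unfold pvCnt
  rw [List.countP_pos_iff]
  refine ⟨(b0, bi), hmem, ?_⟩
  show (!(used.getD bi false) && decide (pvKey b0 = κ)) = true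
  rw [hu, hk]
  simp

theorem pv_cnt_set_ne (l : List (pvReg × Nat)) (used : List Bool) (bi : Nat)
    (h : ∀ p ∈ l, p.2 ≠ bi) (κ : pvKeyT) :
    pvCnt l (used.set bi true) κ = pvCnt l used κ := by
  unfold pvCnt
  apply List.countP_congr
  intro p hp
  rw [pv_getD_set, if_neg (fun hc => h p hp hc.1.symm)]

theorem pv_cnt_set (κ0 : pvKeyT) :
    ∀ (ebs : List (pvReg × Nat)) (used : List Bool) (b0 : pvReg) (bi : Nat),
      (b0, bi) ∈ ebs → (ebs.map Prod.snd).Nodup → bi < used.length →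
      used.getD bi false = false → pvKey b0 = κ0 →
      ∀ κ, pvCnt ebs (used.set bi true) κ = pvCnt ebs used κ - (if κ = κ0 then 1 else 0) := by
  intro ebs
  induction ebs with
  | nil => intro used b0 bi h; cases h
  | cons p rest ih =>
    intro used b0 bi hmem hnd hbil hu hk κ
    have hnd' : p.2 ∉ rest.map Prod.snd ∧ (rest.map Prod.snd).Nodup := by
      simpa [List.nodup_cons] using hnd
    have hC : ∀ (u : List Bool), pvCnt (p :: rest) u κ
        = pvCnt rest u κ + (if !(u.getD p.2 false) && decide (pvKey p.1 = κ) then 1 else 0) := by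
      intro u
      unfold pvCnt
      rw [List.countP_cons]
    rw [hC, hC]
    rcases List.mem_cons.1 hmem with heq | hmemr
    · -- the flipped block is the head
      have hp2 : p.2 = bi := by rw [← heq]
      have hp1 : p.1 = b0 := by rw [← heq]
      have hafter : (used.set bi true).getD p.2 false = true := by
        rw [hp2, pv_getD_set, if_pos ⟨rfl, hbil⟩]
      have hrest_ne : ∀ q ∈ rest, q.2 ≠ bi := by
        intro q hq hqbi
        exact hnd'.1 (hp2 ▸ hqbi ▸ List.mem_map_of_mem hq)
      rw [pv_cnt_set_ne rest used bi hrest_ne κ, hafter]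
      simp only [Bool.not_true, Bool.false_and, if_neg (by simp : ¬((false : Bool) = true))]
      rw [hp2, hu, hp1, hk]
      by_cases hκ : κ = κ0
      · rw [if_pos hκ, if_pos (by simp [hκ])]
        omega
      · rw [if_neg hκ, if_neg (by simp; intro h; exact absurd h.symm hκ)]
        omega
    · -- the flipped block is in the tail
      have hp2 : p.2 ≠ bi := by
        intro h
        exact hnd'.1 (h ▸ List.mem_map_of_mem hmemr)
      have hhead : (used.set bi true).getD p.2 false = used.getD p.2 false := by
        rw [pv_getD_set, if_neg (fun hc => hp2 hc.1.symm)]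
      rw [hhead, ih used b0 bi hmemr hnd'.2 hbil hu hk κ]
      by_cases hκ : κ = κ0
      · have hpos : 0 < pvCnt rest used κ :=
          pv_cnt_pos rest used b0 bi hmemr hu κ (hκ ▸ hk)
        rw [if_pos hκ]
        omega
      · rw [if_neg hκ]
        omega

-- ---- the whole matching phase: greedy flags = bucket counting ----
theorem pv_outerA_spec :
    ∀ (esE ebs : List (pvReg × Nat)) (used full : List Bool) (ans : Int)
      (bucket : PySem.Dict pvKeyT Int),
      (∀ p ∈ esE, p.1 ≠ []) → (∀ p ∈ esE, p.2 < full.length) → (esE.map Prod.snd).Nodup →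
      (∀ p ∈ esE, full.getD p.2 false = false) →
      (∀ p ∈ ebs, p.1 ≠ []) → (∀ p ∈ ebs, p.2 < used.length) → (ebs.map Prod.snd).Nodup →
      (∀ κ, bucket.getD κ 0 = (pvCnt ebs used κ : Int)) →
      pvOuterA ebs esE (used, full, ans) = (esE.foldl (fun st p => pvBStep st p.1) (bucket, ans)).2 := by
  intro esE
  induction esE with
  | nil => intro _ _ _ _ _ _ _ _ _ _ _ _ _; rfl
  | cons pe rest ih =>
    intro ebs used full ans bucket hesne heslen hesnd hesfull hbsne hbslen hbsnd hinv
    obtain ⟨e, ei⟩ := pe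
    have he : e ≠ [] := hesne (e, ei) (List.mem_cons_self ..)
    have hei : ei < full.length := heslen (e, ei) (List.mem_cons_self ..)
    have hfull0 : full.getD ei false = false := hesfull (e, ei) (List.mem_cons_self ..)
    have hesnd' : ei ∉ rest.map Prod.snd ∧ (rest.map Prod.snd).Nodup := by
      simpa [List.nodup_cons] using hesnd
    rw [pvOuterA_cons]
    simp only [List.foldl_cons]
    rcases pv_innerA_spec e ei he ebs used full ans hbsne hbslen hfull0 hei with
      ⟨hzero, hres⟩ | ⟨hpos, b, bi, hmem, hbil, hu, hkeq, hres⟩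
    · -- no block fits: neither side changes state
      have hstep : pvBStep (bucket, ans) e = (bucket, ans) := by
        unfold pvBStep
        rw [if_neg]
        show ¬ bucket.getD (pvKey e) 0 > 0
        rw [hinv (pvKey e), hzero]
        omega
      rw [hres, hstep]
      exact ih ebs used full ans bucket
        (fun p hp => hesne p (List.mem_cons_of_mem _ hp))
        (fun p hp => heslen p (List.mem_cons_of_mem _ hp)) hesnd'.2
        (fun p hp => hesfull p (List.mem_cons_of_mem _ hp)) hbsne hbslen hbsnd hinv
    · -- a block fits: A uses one block, B decrements the bucket
      have hstep : pvBStep (bucket, ans) e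
          = (bucket.insert (pvKey e) (bucket.getD (pvKey e) 0 - 1), ans + (e.length : Int)) := by
        unfold pvBStep
        rw [if_pos]
        show bucket.getD (pvKey e) 0 > 0
        rw [hinv (pvKey e)]
        exact_mod_cast hpos
      rw [hres, hstep]
      apply ih
      · exact fun p hp => hesne p (List.mem_cons_of_mem _ hp)
      · intro p hp
        rw [List.length_set]
        exact heslen p (List.mem_cons_of_mem _ hp)
      · exact hesnd'.2
      · intro p hp
        rw [pv_getD_set, if_neg (fun (hc : ei = p.2 ∧ ei < full.length) => hesnd'.1 (hc.1 ▸ List.mem_map_of_mem hp))]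
        exact hesfull p (List.mem_cons_of_mem _ hp)
      · exact hbsne
      · intro p hp
        rw [List.length_set]
        exact hbslen p hp
      · exact hbsnd
      · intro κ
        rw [PySem.Dict.getD_insert]
        rw [pv_cnt_set (pvKey e) ebs used b bi hmem hbsnd hbil hu hkeq κ]
        by_cases hκ : κ = pvKey e
        · rw [if_pos hκ, if_pos hκ, hinv (pvKey e), hκ]
          have : 0 < pvCnt ebs used (pvKey e) := hpos
          omega
        · rw [if_neg hκ, if_neg hκ]
          simp [hinv κ]

-- ---- regions are nonempty ----
theorem pv_bfsStep_mono (n : Nat) (val : Int) (c : pvCell) :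
    ∀ (l : List (Int × Int)) (st : pvMat × List pvCell × List pvCell),
      ∃ t, (l.foldl (fun s d =>
        let ni : Int := (c.1 : Int) + d.1
        let nj : Int := (c.2 : Int) + d.2
        if 0 ≤ ni ∧ ni < (n : Int) ∧ 0 ≤ nj ∧ nj < (n : Int) ∧ pvGetI s.1 ni.toNat nj.toNat = val then
          (pvMark s.1 ni.toNat nj.toNat, s.2.1 ++ [(ni.toNat, nj.toNat)], s.2.2 ++ [(ni.toNat, nj.toNat)])
        else s) st).2.2 = st.2.2 ++ t := by
  intro l
  induction l with
  | nil => exact fun st => ⟨[], (List.append_nil _).symm⟩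
  | cons d rest ih =>
    intro st
    simp only [List.foldl_cons]
    set ni : Int := (c.1 : Int) + d.1 with hni
    set nj : Int := (c.2 : Int) + d.2 with hnj
    by_cases hc : 0 ≤ ni ∧ ni < (n : Int) ∧ 0 ≤ nj ∧ nj < (n : Int) ∧ pvGetI st.1 ni.toNat nj.toNat = val
    · obtain ⟨t1, h1⟩ := ih (pvMark st.1 ni.toNat nj.toNat, st.2.1 ++ [(ni.toNat, nj.toNat)], st.2.2 ++ [(ni.toNat, nj.toNat)])
      refine ⟨[(ni.toNat, nj.toNat)] ++ t1, ?_⟩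
      rw [if_pos hc] at *
      rw [h1, List.append_assoc]
    · obtain ⟨t1, h1⟩ := ih st
      refine ⟨t1, ?_⟩
      rw [if_neg hc]
      exact h1

theorem pvBfs_cons (n : Nat) (val : Int) (fuel : Nat) (g : pvMat) (c : pvCell)
    (rest cells : List pvCell) :
    pvBfs n val (fuel + 1) g (c :: rest) cells
      = pvBfs n val fuel (pvBfsStep n val c (g, rest, cells)).1
          (pvBfsStep n val c (g, rest, cells)).2.1 (pvBfsStep n val c (g, rest, cells)).2.2 := rfl

theorem pv_bfs_mono (n : Nat) (val : Int) :
    ∀ (fuel : Nat) (g : pvMat) (q cells : List pvCell),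
      ∃ t, (pvBfs n val fuel g q cells).2 = cells ++ t := by
  intro fuel
  induction fuel with
  | zero => exact fun g q cells => ⟨[], (List.append_nil _).symm⟩
  | succ fuel ih =>
    intro g q cells
    cases q with
    | nil => exact ⟨[], (List.append_nil _).symm⟩
    | cons c rest =>
      rw [pvBfs_cons]
      obtain ⟨t0, h0⟩ := pv_bfsStep_mono n val c pvDirs (g, rest, cells)
      obtain ⟨t1, h1⟩ := ih (pvBfsStep n val c (g, rest, cells)).1
        (pvBfsStep n val c (g, rest, cells)).2.1 (pvBfsStep n val c (g, rest, cells)).2.2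
      refine ⟨t0 ++ t1, ?_⟩
      rw [h1]
      have h0' : (pvBfsStep n val c (g, rest, cells)).2.2 = cells ++ t0 := h0
      rw [h0', List.append_assoc]

theorem pv_regions_ne (g : pvMat) (n : Nat) (val : Int) :
    ∀ r ∈ pvRegions g n val, r ≠ [] := by
  have main : ∀ (idx : List pvCell) (st : pvMat × List pvReg),
      (∀ r ∈ st.2, r ≠ []) → ∀ r ∈ (idx.foldl (pvScanStep n val) st).2, r ≠ [] := by
    intro idx
    induction idx with
    | nil => exact fun st h => h
    | cons ij rest ih =>
      intro st hst
      simp only [List.foldl_cons]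
      apply ih
      unfold pvScanStep
      split_ifs with hcond
      · intro r hr
        rcases List.mem_append.1 hr with h | h
        · exact hst r h
        · obtain ⟨t, ht⟩ := pv_bfs_mono n val (n * n + 1) (pvMark st.1 ij.1 ij.2) [(ij.1, ij.2)] [(ij.1, ij.2)]
          have : r = (ij.1, ij.2) :: t := by
            have hr' : r = (pvFlood n val st.1 ij.1 ij.2).2 := by simpa using h
            rw [hr']
            exact ht
          simp [this]
      · exact hst
  intro r hr
  exact main (pvIdx n) (g, []) (by simp) r hr

-- ---- zipIdx bookkeeping ----
theorem pv_zipIdx_mem {α : Type} (l : List α) (p : α × Nat) (hp : p ∈ l.zipIdx) :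
    p.1 ∈ l ∧ p.2 < l.length := by
  have h := List.mem_zipIdx (x := p.1) (i := p.2) (xs := l) (k := 0) (by simpa using hp)
  obtain ⟨-, h2, h3⟩ := h
  refine ⟨?_, by simpa using h2⟩
  rw [h3]
  exact List.getElem_mem _

-- ---- initial bucket = unused count over all blocks ----
theorem pv_bucket_init (bs : List pvReg) (κ : pvKeyT) :
    (bs.foldl (fun d b => d.insert (pvKey b) (d.getD (pvKey b) 0 + 1)) PySem.Dict.empty).getD κ 0
      = (pvCnt bs.zipIdx (List.replicate bs.length false) κ : Int) := by
  have h1 : bs.foldl (fun d b => d.insert (pvKey b) (d.getD (pvKey b) 0 + 1)) (PySem.Dict.empty : PySem.Dict pvKeyT Int)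
      = (bs.map pvKey).foldl (fun d x => d.insert x (d.getD x 0 + 1)) PySem.Dict.empty := by
    rw [List.foldl_map]
  rw [h1, PySem.Dict.foldl_insert_getD_add_one_eq_counter, PySem.Dict.getD_counter]
  congr 1
  rw [List.count_eq_countP, List.countP_map]
  unfold pvCnt
  have h2 : List.countP (fun p => !((List.replicate bs.length false).getD p.2 false) && decide (pvKey p.1 = κ)) bs.zipIdx
      = List.countP (fun p => decide (pvKey p.1 = κ)) bs.zipIdx := by
    apply List.countP_congr
    intro p hp
    rw [pv_getD_replicate]
    simp
  rw [h2]
  have h3 : List.countP (fun p => decide (pvKey p.1 = κ)) bs.zipIdx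
      = List.countP (fun b => decide (pvKey b = κ)) bs := by
    have heq : (fun p : pvReg × Nat => decide (pvKey p.1 = κ))
        = ((fun b : pvReg => decide (pvKey b = κ)) ∘ Prod.fst) := rfl
    rw [heq, ← List.countP_map, List.zipIdx_map_fst]
  rw [h3]
  apply List.countP_congr
  intro b hb
  simp

theorem pv_foldl_zipIdx_fst {σ : Type} (g : σ → pvReg → σ) (es : List pvReg) :
    ∀ (i : Nat) (init : σ),
      ((es.zipIdx i).foldl (fun st p => g st p.1) init) = es.foldl g init := by
  induction es with
  | nil => intro i init; rfl
  | cons e rest ih =>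
    intro i init
    rw [List.zipIdx_cons]
    simp only [List.foldl_cons]
    exact ih (i + 1) (g init e)

-- ---- the matching phases agree ----
theorem pv_matchA_eq (es bs : List pvReg) (hes : ∀ e ∈ es, e ≠ []) (hbs : ∀ b ∈ bs, b ≠ []) :
    pvOuterA bs.zipIdx es.zipIdx
      (List.replicate bs.length false, List.replicate es.length false, 0)
      = (es.foldl pvBStep
          (bs.foldl (fun d b => d.insert (pvKey b) (d.getD (pvKey b) 0 + 1)) PySem.Dict.empty, 0)).2 := by
  rw [pv_outerA_spec es.zipIdx bs.zipIdx (List.replicate bs.length false)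
      (List.replicate es.length false) 0
      (bs.foldl (fun d b => d.insert (pvKey b) (d.getD (pvKey b) 0 + 1)) PySem.Dict.empty)
      (fun p hp => hes p.1 (pv_zipIdx_mem es p hp).1)
      (fun p hp => by rw [List.length_replicate]; exact (pv_zipIdx_mem es p hp).2)
      (List.nodup_zipIdx_map_snd es)
      (fun p hp => pv_getD_replicate _ _ _)
      (fun p hp => hbs p.1 (pv_zipIdx_mem bs p hp).1)
      (fun p hp => by rw [List.length_replicate]; exact (pv_zipIdx_mem bs p hp).2)
      (List.nodup_zipIdx_map_snd bs)
      (pv_bucket_init bs)]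
  congr 1
  exact pv_foldl_zipIdx_fst pvBStep es 0 _

theorem solution_eq_alt (gb tb : List (List Int)) : solution gb tb = solution_alt gb tb := by
  simp only [solution, solution_alt, pvRegions]
  rw [PySem.List.foldl_prod_mk (pvScanStep gb.length 0) (pvScanStep gb.length 1)
      (pvIdx gb.length) ((gb, []) : pvMat × List pvReg) ((tb, []) : pvMat × List pvReg)]
  exact pv_matchA_eq ((pvIdx gb.length).foldl (pvScanStep gb.length 0) (gb, [])).2
    ((pvIdx gb.length).foldl (pvScanStep gb.length 1) (tb, [])).2
    (pv_regions_ne gb gb.length 0) (pv_regions_ne tb gb.length 1)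

-- ===== VERDICT (by name: the statement is the Claim_ definition above) =====
theorem solution_spec : Claim_equal_solution := by
  intro gb tb _ _
  unfold Spec_solution
  exact solution_eq_alt gb tb
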